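-- pv_equiv track=rewrite | github.com/Leapense/problems | 12052번: gBalloon (Small)/gBalloon (Small).py | can_collect_all
-- ===== SOURCE A (Python) =====
-- def can_collect_all(T, balloons, winds, Q):
--     total_cost = 0
--     for P, orig_h in balloons:
--         best = float('inf')
--         for j, V in enumerate(winds):
--             # Check if balloon is collected at time T with wind V.
--             if P == 0:
--                 best = min(best, abs(orig_h - j))
--             elif V == 0:
--                 continue
--             elif P < 0:
--                 if V > 0 and P + T * V >= 0:
--                     best = min(best, abs(orig_h - j))
--             elif P > 0:
--                 if V < 0 and P + T * V <= 0:
--                     best = min(best, abs(orig_h - j))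
--         if best == float('inf'):
--             return False
--         total_cost += best
--         if total_cost > Q:
--             return False
--     return True
-- ===== SOURCE B (Python) =====
-- def _ok(T, P, V):
--     # eligibility of a wind value V for a balloon at position P collected by time T
--     if P == 0:
--         return True
--     if P < 0:
--         return V > 0 and P + T * V >= 0
--     return V < 0 and P + T * V <= 0
--
--
-- def _nearest(T, P, h, winds, W):
--     # two-pointer nearest-first search: l walks left from h, r walks right,
--     # always probing the closer of the two; stops at the first eligible index
--     l = min(h, W - 1)
--     r = max(h, 0)
--     if l == r:
--         r += 1
--     while True:
--         if l >= 0: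
--             if r < W and h - l > r - h:
--                 if _ok(T, P, winds[r]):
--                     return r - h
--                 r += 1
--             else:
--                 if _ok(T, P, winds[l]):
--                     return h - l
--                 l -= 1
--         elif r < W:
--             if _ok(T, P, winds[r]):
--                 return r - h
--             r += 1
--         else:
--             return None
--
--
-- def can_collect_all(T, balloons, winds, Q):
--     W = len(winds)
--     budget = Q
--     for P, h in balloons:
--         d = _nearest(T, P, h, winds, W)
--         if d is None:
--             return False
--         budget -= d
--         if budget < 0:
--             return False
--     return True
-- ===== Notes on version B (the rewrite author's own statement) =====
-- stated objective: alternative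
-- what changed: Per balloon, instead of scanning every wind index and folding a running minimum, B searches outward from the balloon's index by increasing distance and returns the first eligible index, decrementing a remaining budget instead of accumulating a total.
import Mathlib
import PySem

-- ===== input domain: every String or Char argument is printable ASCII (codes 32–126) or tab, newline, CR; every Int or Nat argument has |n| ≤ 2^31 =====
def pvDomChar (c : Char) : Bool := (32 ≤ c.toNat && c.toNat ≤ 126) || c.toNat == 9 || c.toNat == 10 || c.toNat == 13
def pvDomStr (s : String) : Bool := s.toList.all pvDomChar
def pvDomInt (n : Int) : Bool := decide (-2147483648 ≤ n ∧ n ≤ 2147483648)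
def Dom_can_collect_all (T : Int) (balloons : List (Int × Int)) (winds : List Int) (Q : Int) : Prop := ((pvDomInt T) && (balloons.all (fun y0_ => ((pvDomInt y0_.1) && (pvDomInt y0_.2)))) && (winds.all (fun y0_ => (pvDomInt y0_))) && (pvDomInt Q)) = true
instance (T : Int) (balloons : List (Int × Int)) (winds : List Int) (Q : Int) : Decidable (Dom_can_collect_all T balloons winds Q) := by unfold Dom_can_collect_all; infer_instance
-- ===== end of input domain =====

-- B replaces A's full scan of all winds per balloon (folding a running minimum) by an
-- outward search from the balloon's index that stops at the first eligible distance,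
-- and keeps a remaining budget instead of an accumulated total; return values agree everywhere.

-- ===== PORT A =====
-- 'best = min(best, x)' with best starting at float('inf'): none models inf.
def pvOminA (best : Option Int) (x : Int) : Option Int :=
  match best with
  | none => some x
  | some b => some (min b x)

-- the body of A's inner loop, same branch order as the Python
def pvStepA (T P h : Int) (best : Option Int) (jv : Int × Int) : Option Int :=
  if P = 0 then pvOminA best |h - jv.1|
  else if jv.2 = 0 then best
  else if P < 0 then (if jv.2 > 0 ∧ P + T * jv.2 ≥ 0 then pvOminA best |h - jv.1| else best)
  else if P > 0 then (if jv.2 < 0 ∧ P + T * jv.2 ≤ 0 then pvOminA best |h - jv.1| else best)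
  else best

-- A's inner loop: for j, V in enumerate(winds)
def pvBestA (T P h : Int) (winds : List Int) : Option Int :=
  (PySem.List.enumerate winds 0).foldl (pvStepA T P h) none

-- A's outer loop with its early returns
def pvGoA (T Q : Int) (winds : List Int) : List (Int × Int) → Int → Bool
  | [], _ => true
  | (P, h) :: rest, total =>
    match pvBestA T P h winds with
    | none => false
    | some b => if total + b > Q then false else pvGoA T Q winds rest (total + b)

def can_collect_all (T : Int) (balloons : List (Int × Int)) (winds : List Int) (Q : Int) : Bool :=
  pvGoA T Q winds balloons 0

-- ===== PORT B =====
def pvOkB (T P V : Int) : Bool :=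
  if P = 0 then true
  else if P < 0 then decide (V > 0 ∧ P + T * V ≥ 0)
  else decide (V < 0 ∧ P + T * V ≤ 0)

-- two-pointer nearest-first search of B: l walks left from h, r walks right,
-- always probing the closer side; stops at the first eligible index
def pvTwoPtr (T P h : Int) (winds : List Int) (W : Int) : Nat → Int → Int → Option Int
  | 0, _, _ => none
  | fuel + 1, l, r =>
    if 0 ≤ l then
      if r < W ∧ h - l > r - h then
        if pvOkB T P (winds.getD r.toNat 0) then some (r - h) else pvTwoPtr T P h winds W fuel l (r + 1)
      else
        if pvOkB T P (winds.getD l.toNat 0) then some (h - l) else pvTwoPtr T P h winds W fuel (l - 1) r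
    else if r < W then
      if pvOkB T P (winds.getD r.toNat 0) then some (r - h) else pvTwoPtr T P h winds W fuel l (r + 1)
    else none

-- fuel = (l+1).toNat + (W-r).toNat iterations suffice: each step moves l left or r right
def pvNearestB (T P h : Int) (winds : List Int) (W : Int) : Option Int :=
  if min h (W - 1) = max h 0 then
    pvTwoPtr T P h winds W ((min h (W - 1) + 1).toNat + (W - (max h 0 + 1)).toNat) (min h (W - 1)) (max h 0 + 1)
  else
    pvTwoPtr T P h winds W ((min h (W - 1) + 1).toNat + (W - max h 0).toNat) (min h (W - 1)) (max h 0)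

def pvGoB (T : Int) (winds : List Int) (W : Int) : List (Int × Int) → Int → Bool
  | [], _ => true
  | (P, h) :: rest, budget =>
    match pvNearestB T P h winds W with
    | none => false
    | some d => if budget - d < 0 then false else pvGoB T winds W rest (budget - d)

def can_collect_all_alt (T : Int) (balloons : List (Int × Int)) (winds : List Int) (Q : Int) : Bool :=
  pvGoB T winds (winds.length : Int) balloons Q

-- ===== PRECONDITION & SPEC =====
def Spec_can_collect_all (T : Int) (balloons : List (Int × Int)) (winds : List Int) (Q : Int) (out : Bool) : Prop := out = can_collect_all_alt T balloons winds Q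
instance (T : Int) (balloons : List (Int × Int)) (winds : List Int) (Q : Int) (out : Bool) : Decidable (Spec_can_collect_all T balloons winds Q out) := by unfold Spec_can_collect_all; infer_instance

-- ===== CLAIM (what is proved, stated in full; the proofs are below) =====
def Claim_equal_can_collect_all : Prop := ∀ (T : Int) (balloons : List (Int × Int)) (winds : List Int) (Q : Int), Dom_can_collect_all T balloons winds Q → Spec_can_collect_all T balloons winds Q (can_collect_all T balloons winds Q)

-- ===== LEMMAS AND PROOFS =====

-- optional minimum of a list (none = empty), the common value of both inner loops
def pvMinL : List Int → Option Int
  | [] => none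
  | a :: l => some (List.foldl min a l)

-- list of distances |h - j| of the eligible wind indices j, indices starting at n
def pvDists (T P h : Int) : List Int → Int → List Int
  | [], _ => []
  | V :: ws, n =>
    if pvOkB T P V then |h - n| :: pvDists T P h ws (n + 1) else pvDists T P h ws (n + 1)

lemma pvMinL_toList (acc : Option Int) : pvMinL acc.toList = acc := by
  cases acc <;> rfl

lemma pvMinL_step (acc : Option Int) (x : Int) (rest : List Int) :
    pvMinL (acc.toList ++ (x :: rest)) = pvMinL ((pvOminA acc x).toList ++ rest) := by
  cases acc <;> rfl

lemma pvFoldlMin_le (l : List Int) : ∀ a : Int, List.foldl min a l ≤ a ∧ ∀ x ∈ l, List.foldl min a l ≤ x := by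
  induction l with
  | nil => intro a; exact ⟨le_refl a, by simp⟩
  | cons b l ih =>
    intro a
    have h := ih (min a b)
    refine ⟨le_trans h.1 (min_le_left a b), ?_⟩
    intro x hx
    rcases List.mem_cons.mp hx with rfl | hx
    · exact le_trans (by simpa using h.1) (min_le_right a x)
    · exact h.2 x hx

lemma pvFoldlMin_mem (l : List Int) : ∀ a : Int, List.foldl min a l = a ∨ List.foldl min a l ∈ l := by
  induction l with
  | nil => intro a; left; rfl
  | cons b l ih =>
    intro a
    rcases ih (min a b) with h | h
    · rcases min_choice a b with hm | hm
      · left; simp only [List.foldl_cons]; rw [h, hm]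
      · right; simp only [List.foldl_cons]; rw [h, hm]; exact List.mem_cons_self
    · right; exact List.mem_cons_of_mem _ h

lemma pvMinL_mem {l : List Int} {m : Int} (h : pvMinL l = some m) : m ∈ l := by
  cases l with
  | nil => simp [pvMinL] at h
  | cons a l =>
    simp only [pvMinL, Option.some.injEq] at h
    rcases pvFoldlMin_mem l a with h' | h'
    · rw [← h, h']; exact List.mem_cons_self
    · rw [← h]; exact List.mem_cons_of_mem _ h'

lemma pvMinL_le {l : List Int} {m : Int} (h : pvMinL l = some m) : ∀ x ∈ l, m ≤ x := by
  cases l with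
  | nil => simp [pvMinL] at h
  | cons a l =>
    simp only [pvMinL, Option.some.injEq] at h
    intro x hx
    rcases List.mem_cons.mp hx with rfl | hx
    · rw [← h]; exact (pvFoldlMin_le l x).1
    · rw [← h]; exact (pvFoldlMin_le l a).2 x hx

lemma pvMinL_none {l : List Int} (h : pvMinL l = none) : l = [] := by
  cases l with
  | nil => rfl
  | cons a l => simp [pvMinL] at h

lemma pvStepA_eq (T P h : Int) (acc : Option Int) (n V : Int) :
    pvStepA T P h acc (n, V) = (if pvOkB T P V then pvOminA acc |h - n| else acc) := by
  unfold pvStepA pvOkB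
  by_cases hP0 : P = 0
  · simp [hP0]
  · by_cases hV : V = 0
    · by_cases hPn : P < 0 <;> simp [hP0, hV, hPn]
    · by_cases hPn : P < 0
      · simp [hP0, hV, hPn]
      · have hPp : 0 < P := by omega
        simp [hP0, hV, hPn, hPp]

lemma pvFoldA_eq (T P h : Int) :
    ∀ (ws : List Int) (n : Int) (acc : Option Int),
      (PySem.List.enumerate ws n).foldl (pvStepA T P h) acc
      = pvMinL (acc.toList ++ pvDists T P h ws n) := by
  intro ws
  induction ws with
  | nil =>
    intro n acc
    simp only [PySem.List.enumerate_nil, List.foldl_nil, pvDists, List.append_nil]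
    exact (pvMinL_toList acc).symm
  | cons V ws ih =>
    intro n acc
    rw [PySem.List.enumerate_cons, List.foldl_cons, ih (n + 1) _, pvStepA_eq]
    by_cases hok : pvOkB T P V = true
    · simp only [pvDists, hok, if_true]
      exact (pvMinL_step acc _ _).symm
    · simp only [pvDists, hok, if_false, Bool.false_eq_true]

lemma mem_pvDists (T P h : Int) :
    ∀ (ws : List Int) (n x : Int),
      x ∈ pvDists T P h ws n ↔
        ∃ (k : Nat) (hk : k < ws.length), pvOkB T P ws[k] = true ∧ x = |h - (n + k)| := by
  intro ws
  induction ws with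
  | nil => intro n x; simp [pvDists]
  | cons V ws ih =>
    intro n x
    by_cases hok : pvOkB T P V = true
    · simp only [pvDists, hok, if_true, List.mem_cons, ih]
      constructor
      · rintro (rfl | ⟨k, hk, h1, h2⟩)
        · exact ⟨0, by simp, by simpa using hok, by simp⟩
        · refine ⟨k + 1, by simpa using Nat.succ_lt_succ hk, by simpa using h1, ?_⟩
          rw [h2]; congr 1; push_cast; ring
      · rintro ⟨k, hk, h1, h2⟩
        cases k with
        | zero => left; simpa using h2
        | succ k =>
          right
          refine ⟨k, by simpa using Nat.lt_of_succ_lt_succ hk, by simpa using h1, ?_⟩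
          rw [h2]; congr 1; push_cast; ring
    · simp only [pvDists, hok, if_false, Bool.false_eq_true, ih]
      constructor
      · rintro ⟨k, hk, h1, h2⟩
        refine ⟨k + 1, by simpa using Nat.succ_lt_succ hk, by simpa using h1, ?_⟩
        rw [h2]; congr 1; push_cast; ring
      · rintro ⟨k, hk, h1, h2⟩
        cases k with
        | zero =>
          exfalso; apply hok; simpa using h1
        | succ k =>
          refine ⟨k, by simpa using Nat.lt_of_succ_lt_succ hk, by simpa using h1, ?_⟩
          rw [h2]; congr 1; push_cast; ring

lemma pvTwoPtr_none (T P h : Int) (winds : List Int) :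
    ∀ (n : Nat) (l r : Int), (l + 1).toNat + ((winds.length : Int) - r).toNat = n →
      0 ≤ r → l < (winds.length : Int) →
      (∀ j : Nat, j < winds.length → pvOkB T P (winds.getD j 0) = false) →
      pvTwoPtr T P h winds (winds.length : Int) n l r = none := by
  intro n
  induction n with
  | zero =>
    intro l r hn _ _ _
    rfl
  | succ n ih =>
    intro l r hn hr0 hlw hall
    rw [pvTwoPtr]
    by_cases hl : 0 ≤ l
    · rw [if_pos hl]
      by_cases hr : r < (winds.length : Int) ∧ h - l > r - h
      · rw [if_pos hr, hall r.toNat (by omega), if_neg (by simp)]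
        exact ih l (r + 1) (by omega) (by omega) hlw hall
      · rw [if_neg hr, hall l.toNat (by omega), if_neg (by simp)]
        exact ih (l - 1) r (by omega) hr0 (by omega) hall
    · rw [if_neg hl]
      by_cases hr : r < (winds.length : Int)
      · rw [if_pos hr, hall r.toNat (by omega), if_neg (by simp)]
        exact ih l (r + 1) (by omega) (by omega) hlw hall
      · rw [if_neg hr]

lemma pvTwoPtr_some (T P h : Int) (winds : List Int) (m : Int) :
    ∀ (n : Nat) (l r : Int), (l + 1).toNat + ((winds.length : Int) - r).toNat = n →
      l ≤ h → h ≤ r → l < (winds.length : Int) → 0 ≤ r →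
      (∀ j : Nat, l < (j : Int) → (j : Int) < r → j < winds.length → pvOkB T P (winds.getD j 0) = false) →
      (∃ j : Nat, j < winds.length ∧ pvOkB T P (winds.getD j 0) = true ∧ |h - (j : Int)| = m) →
      (∀ j : Nat, j < winds.length → pvOkB T P (winds.getD j 0) = true → m ≤ |h - (j : Int)|) →
      pvTwoPtr T P h winds (winds.length : Int) n l r = some m := by
  intro n
  induction n with
  | zero =>
    intro l r hn _ _ _ _ hgap hwit _
    exfalso
    obtain ⟨j, hj, hjok, _⟩ := hwit
    have hjlen : (j : Int) < (winds.length : Int) := by exact_mod_cast hj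
    rw [hgap j (by omega) (by omega) hj] at hjok
    simp at hjok
  | succ n ih =>
    intro l r hn hlh hhr hlw hr0 hgap hwit hlb
    rw [pvTwoPtr]
    by_cases hl : 0 ≤ l
    · rw [if_pos hl]
      by_cases hr : r < (winds.length : Int) ∧ h - l > r - h
      · rw [if_pos hr]
        by_cases hok : pvOkB T P (winds.getD r.toNat 0) = true
        · rw [if_pos hok]
          congr 1
          have h1 := hlb r.toNat (by omega) hok
          rw [Int.toNat_of_nonneg hr0, abs_of_nonpos (by omega)] at h1
          obtain ⟨j, hj, hjok, hjabs⟩ := hwit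
          have hjlen : (j : Int) < (winds.length : Int) := by exact_mod_cast hj
          by_cases hjl : (j : Int) ≤ l
          · rw [abs_of_nonneg (by omega)] at hjabs
            omega
          · by_cases hjr : (j : Int) < r
            · rw [hgap j (by omega) hjr hj] at hjok
              simp at hjok
            · rw [abs_of_nonpos (by omega)] at hjabs
              omega
        · rw [if_neg hok]
          refine ih l (r + 1) (by omega) hlh (by omega) hlw (by omega) ?_ hwit hlb
          intro j hj1 hj2 hj3
          by_cases hjr : (j : Int) = r
          · have hjn : j = r.toNat := by omega
            rw [hjn]
            rw [Bool.not_eq_true] at hok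
            exact hok
          · exact hgap j hj1 (by omega) hj3
      · rw [if_neg hr]
        by_cases hok : pvOkB T P (winds.getD l.toNat 0) = true
        · rw [if_pos hok]
          congr 1
          have h1 := hlb l.toNat (by omega) hok
          rw [Int.toNat_of_nonneg hl, abs_of_nonneg (by omega)] at h1
          obtain ⟨j, hj, hjok, hjabs⟩ := hwit
          have hjlen : (j : Int) < (winds.length : Int) := by exact_mod_cast hj
          by_cases hjl : (j : Int) ≤ l
          · rw [abs_of_nonneg (by omega)] at hjabs
            omega
          · by_cases hjr : (j : Int) < r
            · rw [hgap j (by omega) hjr hj] at hjok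
              simp at hjok
            · by_cases hrl : r < (winds.length : Int)
              · have hnr : ¬(h - l > r - h) := by
                  intro hcon
                  exact hr ⟨hrl, hcon⟩
                rw [abs_of_nonpos (by omega)] at hjabs
                omega
              · omega
        · rw [if_neg hok]
          refine ih (l - 1) r (by omega) (by omega) hhr (by omega) hr0 ?_ hwit hlb
          intro j hj1 hj2 hj3
          by_cases hjl : (j : Int) = l
          · have hjn : j = l.toNat := by omega
            rw [hjn]
            rw [Bool.not_eq_true] at hok
            exact hok
          · exact hgap j (by omega) hj2 hj3
    · rw [if_neg hl]
      by_cases hr : r < (winds.length : Int)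
      · rw [if_pos hr]
        by_cases hok : pvOkB T P (winds.getD r.toNat 0) = true
        · rw [if_pos hok]
          congr 1
          have h1 := hlb r.toNat (by omega) hok
          rw [Int.toNat_of_nonneg hr0, abs_of_nonpos (by omega)] at h1
          obtain ⟨j, hj, hjok, hjabs⟩ := hwit
          by_cases hjr : (j : Int) < r
          · rw [hgap j (by omega) hjr hj] at hjok
            simp at hjok
          · rw [abs_of_nonpos (by omega)] at hjabs
            omega
        · rw [if_neg hok]
          refine ih l (r + 1) (by omega) hlh (by omega) hlw (by omega) ?_ hwit hlb
          intro j hj1 hj2 hj3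
          by_cases hjr : (j : Int) = r
          · have hjn : j = r.toNat := by omega
            rw [hjn]
            rw [Bool.not_eq_true] at hok
            exact hok
          · exact hgap j hj1 (by omega) hj3
      · rw [if_neg hr]
        exfalso
        obtain ⟨j, hj, hjok, _⟩ := hwit
        have hjlen : (j : Int) < (winds.length : Int) := by exact_mod_cast hj
        rw [hgap j (by omega) (by omega) hj] at hjok
        simp at hjok

lemma pvInitFacts (h : Int) (winds : List Int) :
    min h ((winds.length : Int) - 1) ≤ h ∧ h ≤ max h 0 ∧
      min h ((winds.length : Int) - 1) < (winds.length : Int) ∧ 0 ≤ max h 0 := by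
  refine ⟨min_le_left _ _, le_max_left _ _, ?_, le_max_right _ _⟩
  have := min_le_right h ((winds.length : Int) - 1)
  omega

lemma pvInitGap (h : Int) (winds : List Int) (_hne : ¬ min h ((winds.length : Int) - 1) = max h 0) :
    ∀ j : Nat, min h ((winds.length : Int) - 1) < (j : Int) → (j : Int) < max h 0 →
      j < winds.length → False := by
  intro j hj1 hj2 hj3
  have hj0 : (0 : Int) ≤ (j : Int) := Int.natCast_nonneg j
  have hjlen : (j : Int) < (winds.length : Int) := by exact_mod_cast hj3
  by_cases hh : 0 ≤ h
  · rw [max_eq_left hh] at hj2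
    by_cases hhl : h ≤ (winds.length : Int) - 1
    · rw [min_eq_left hhl] at hj1
      omega
    · rw [min_eq_right (by omega)] at hj1
      omega
  · rw [max_eq_right (by omega)] at hj2
    omega

lemma pvNearest_eq_min (T P h : Int) (winds : List Int) :
    pvNearestB T P h winds (winds.length : Int) = pvMinL (pvDists T P h winds 0) := by
  obtain ⟨hi1, hi2, hi3, hi4⟩ := pvInitFacts h winds
  unfold pvNearestB
  cases hmin : pvMinL (pvDists T P h winds 0) with
  | none =>
    have hnil := pvMinL_none hmin
    have hall : ∀ j : Nat, j < winds.length → pvOkB T P (winds.getD j 0) = false := by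
      intro j hj
      by_contra hb
      rw [Bool.not_eq_false] at hb
      rw [List.getD_eq_getElem winds 0 hj] at hb
      have hmem : |h - (j : Int)| ∈ pvDists T P h winds 0 :=
        (mem_pvDists T P h winds 0 _).mpr ⟨j, hj, hb, by simp⟩
      rw [hnil] at hmem
      simp at hmem
    by_cases heq : min h ((winds.length : Int) - 1) = max h 0
    · rw [if_pos heq]
      exact pvTwoPtr_none T P h winds _ _ _ rfl (by omega) hi3 hall
    · rw [if_neg heq]
      exact pvTwoPtr_none T P h winds _ _ _ rfl hi4 hi3 hall
  | some m =>
    have hmem := pvMinL_mem hmin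
    have hlbm := pvMinL_le hmin
    rcases (mem_pvDists T P h winds 0 m).mp hmem with ⟨k, hk, hok, hm⟩
    have hwit : ∃ j : Nat, j < winds.length ∧ pvOkB T P (winds.getD j 0) = true ∧ |h - (j : Int)| = m := by
      refine ⟨k, hk, ?_, ?_⟩
      · rw [List.getD_eq_getElem winds 0 hk]
        exact hok
      · rw [hm]; congr 1; omega
    have hlb : ∀ j : Nat, j < winds.length → pvOkB T P (winds.getD j 0) = true → m ≤ |h - (j : Int)| := by
      intro j hj hjok
      rw [List.getD_eq_getElem winds 0 hj] at hjok
      exact hlbm _ ((mem_pvDists T P h winds 0 _).mpr ⟨j, hj, hjok, by simp⟩)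
    by_cases heq : min h ((winds.length : Int) - 1) = max h 0
    · rw [if_pos heq]
      refine pvTwoPtr_some T P h winds m _ _ _ rfl hi1 (by omega) hi3 (by omega) ?_ hwit hlb
      intro j hj1 hj2 hj3
      exfalso
      omega
    · rw [if_neg heq]
      refine pvTwoPtr_some T P h winds m _ _ _ rfl hi1 hi2 hi3 hi4 ?_ hwit hlb
      intro j hj1 hj2 hj3
      exact (pvInitGap h winds heq j hj1 hj2 hj3).elim

lemma pvBestA_eq_nearest (T P h : Int) (winds : List Int) :
    pvBestA T P h winds = pvNearestB T P h winds (winds.length : Int) := by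
  rw [pvNearest_eq_min]
  unfold pvBestA
  rw [pvFoldA_eq T P h winds 0 none]
  rfl

lemma pvGo_eq (T Q : Int) (winds : List Int) :
    ∀ (bs : List (Int × Int)) (total : Int),
      pvGoA T Q winds bs total = pvGoB T winds (winds.length : Int) bs (Q - total) := by
  intro bs
  induction bs with
  | nil => intro total; rfl
  | cons b rest ih =>
    intro total
    obtain ⟨P, hh⟩ := b
    simp only [pvGoA, pvGoB, pvBestA_eq_nearest]
    cases hnb : pvNearestB T P hh winds (winds.length : Int) with
    | none => rfl
    | some d =>
      dsimp only
      by_cases hc : total + d > Q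
      · rw [if_pos hc, if_pos (by omega)]
      · rw [if_neg hc, if_neg (by omega), ih (total + d)]
        congr 1
        ring

-- ===== VERDICT (by name: the statement is the Claim_ definition above) =====
theorem can_collect_all_spec : Claim_equal_can_collect_all := by
  intro T balloons winds Q _
  unfold Spec_can_collect_all can_collect_all can_collect_all_alt
  rw [pvGo_eq]
  norm_num
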